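-- pv_equiv track=rewrite | github.com/liupei-wq/Data-Processing-GUI | modules/raman.py | _default_compare_columns
-- ===== SOURCE A (Python) =====
-- def _default_compare_columns(columns: list[str]) -> list[str]:
--     ordered: list[str] = []
--     for matcher in [
--         lambda c: c.endswith("_raw") or c == "Intensity_raw",
--         lambda c: c == "Background",
--         lambda c: c.endswith("_bg_subtracted"),
--         lambda c: c.endswith("_smoothed"),
--         lambda c: c.endswith("_normalized"),
--         lambda c: c.endswith("_despiked"),
--     ]:
--         match = next((col for col in columns if matcher(col)), None)
--         if match and match not in ordered:
--             ordered.append(match)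
--     if not ordered:
--         return columns[: min(3, len(columns))]
--     return ordered[: min(4, len(ordered))]
-- ===== SOURCE B (Python) =====
-- def _rank(col: str):
--     if col == "Background":
--         return 1
--     if col.endswith("_raw"):
--         return 0
--     if col.endswith("_bg_subtracted"):
--         return 2
--     if col.endswith("_smoothed"):
--         return 3
--     if col.endswith("_normalized"):
--         return 4
--     if col.endswith("_despiked"):
--         return 5
--     return None
--
--
-- def _default_compare_columns(columns: list[str]) -> list[str]:
--     first_by_rank: dict[int, str] = {}
--     for col in columns:
--         rank = _rank(col)
--         if rank is not None:
--             first_by_rank.setdefault(rank, col)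
--     ordered = [col for _, col in sorted(first_by_rank.items(), key=lambda item: item[0])]
--     if not ordered:
--         return columns[:3]
--     return ordered[:4]
-- ===== Notes on version B (the rewrite author's own statement) =====
-- stated objective: alternative
-- what changed: A runs six separate next() scans of the column list, one per matcher, with a dedup check; B classifies each column once with a single mutually-exclusive rank function, records the first column per rank in a dict via setdefault in one pass, and emits the values of the items sorted by rank, with no dedup step.
import Mathlib
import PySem

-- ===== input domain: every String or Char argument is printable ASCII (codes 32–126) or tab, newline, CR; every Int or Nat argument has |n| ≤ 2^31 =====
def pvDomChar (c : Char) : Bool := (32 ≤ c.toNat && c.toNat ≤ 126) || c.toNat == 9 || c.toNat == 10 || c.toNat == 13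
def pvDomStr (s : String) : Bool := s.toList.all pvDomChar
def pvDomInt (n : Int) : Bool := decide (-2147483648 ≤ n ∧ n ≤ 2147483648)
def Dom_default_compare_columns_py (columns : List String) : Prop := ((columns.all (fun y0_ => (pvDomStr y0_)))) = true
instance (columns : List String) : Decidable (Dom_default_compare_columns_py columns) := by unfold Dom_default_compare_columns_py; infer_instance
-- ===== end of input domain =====

-- B replaces A's six per-matcher next() scans (with a dedup check) by one classifying pass:
-- a single mutually-exclusive rank function, a first-occurrence-per-rank dict built with
-- setdefault, and the dict items sorted by rank (objective: alternative).

-- ===== PORT A =====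
-- A's six matcher lambdas, in order
def pvMatchersA : List (String → Bool) :=
  [ fun c => PySem.Str.endswith c "_raw" || c == "Intensity_raw",
    fun c => c == "Background",
    fun c => PySem.Str.endswith c "_bg_subtracted",
    fun c => PySem.Str.endswith c "_smoothed",
    fun c => PySem.Str.endswith c "_normalized",
    fun c => PySem.Str.endswith c "_despiked" ]

-- A's loop body: 'if match and match not in ordered: ordered.append(match)'
def pvStepA (ordered : List String) (m? : Option String) : List String :=
  match m? with
  | none => ordered
  | some m => if m ≠ "" ∧ ¬ ordered.contains m then ordered ++ [m] else ordered

def default_compare_columns_py (columns : List String) : List String :=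
  let ordered := pvMatchersA.foldl (fun ordered matcher =>
      -- match = next((col for col in columns if matcher(col)), None)
      pvStepA ordered (columns.find? matcher)) []
  if ordered = [] then columns.take (min 3 columns.length)
  else ordered.take (min 4 ordered.length)

-- ===== PORT B =====
-- Source B's _rank: one exclusive classifier, checked in the written order
def pvRank (col : String) : Option Int :=
  if col == "Background" then some 1
  else if PySem.Str.endswith col "_raw" then some 0
  else if PySem.Str.endswith col "_bg_subtracted" then some 2
  else if PySem.Str.endswith col "_smoothed" then some 3
  else if PySem.Str.endswith col "_normalized" then some 4
  else if PySem.Str.endswith col "_despiked" then some 5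
  else none

-- Source B's loop body: 'if rank is not None: first_by_rank.setdefault(rank, col)'
def pvStepB (d : PySem.Dict Int String) (col : String) : PySem.Dict Int String :=
  match pvRank col with
  | some r => d.setdefault r col
  | none => d

def default_compare_columns_py_alt (columns : List String) : List String :=
  let first_by_rank := columns.foldl pvStepB (PySem.Dict.empty : PySem.Dict Int String)
  let ordered := (PySem.List.sorted first_by_rank.items (fun item => item.1)).map (fun item => item.2)
  if ordered = [] then columns.take 3
  else ordered.take 4

-- ===== PRECONDITION & SPEC =====
def Spec_default_compare_columns_py (columns : List String) (out : List String) : Prop := out = default_compare_columns_py_alt columns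
instance (columns : List String) (out : List String) : Decidable (Spec_default_compare_columns_py columns out) := by unfold Spec_default_compare_columns_py; infer_instance

-- ===== CLAIM (what is proved, stated in full; the proofs are below) =====
def Claim_equal_default_compare_columns_py : Prop := ∀ (columns : List String), Dom_default_compare_columns_py columns → Spec_default_compare_columns_py columns (default_compare_columns_py columns)

-- ===== LEMMAS AND PROOFS =====

-- first column of the given rank, as A's find? computes it
def pvFind (columns : List String) (r : Int) : Option String :=
  columns.find? (fun c => pvRank c == some r)

-- the rank values in priority order
def pvRanks : List Int := [0, 1, 2, 3, 4, 5]

-- exclusivity of suffix matchers: non-nested suffixes cannot both match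
theorem pvExcl (c s t : String) (hns : ¬ (t.toList <:+ s.toList)) (hnt : ¬ (s.toList <:+ t.toList))
    (h : PySem.Str.endswith c s = true) : PySem.Str.endswith c t = false := by
  by_contra hb
  rw [Bool.not_eq_false] at hb
  rw [PySem.Str.endswith_eq] at h hb
  have h1 : s.toList <:+ c.toList := (PySem.Chars.endswith_iff _ _).mp h
  have h2 : t.toList <:+ c.toList := (PySem.Chars.endswith_iff _ _).mp hb
  rcases List.suffix_or_suffix_of_suffix h1 h2 with h3 | h3
  · exact hnt h3
  · exact hns h3

theorem pvM0 : (fun c => PySem.Str.endswith c "_raw" || c == "Intensity_raw")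
    = (fun c => pvRank c == some 0) := by
  funext c
  by_cases hb : c = "Background"
  · subst hb; decide
  · have hb' : (c == "Background") = false := by simpa using hb
    by_cases h0 : PySem.Str.endswith c "_raw"
    · simp at h0
      simp [pvRank, hb', h0]
    · have hI : (c == "Intensity_raw") = false := by
        rcases eq_or_ne c "Intensity_raw" with he | he
        · subst he; exact absurd (by decide : PySem.Str.endswith "Intensity_raw" "_raw" = true) h0
        · simpa using he
      simp only [pvRank, hb', h0, Bool.false_eq_true, if_false]
      simp only [Bool.not_eq_true] at h0
      simp only [hI, Bool.or_false]
      split_ifs <;> decide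

theorem pvM1 : (fun c => c == "Background") = (fun c => pvRank c == some 1) := by
  funext c
  by_cases hb : c = "Background"
  · subst hb; decide
  · have hb' : (c == "Background") = false := by simpa using hb
    simp only [pvRank, hb', Bool.false_eq_true, if_false]
    split_ifs <;> decide

theorem pvM2 : (fun c => PySem.Str.endswith c "_bg_subtracted") = (fun c => pvRank c == some 2) := by
  funext c
  by_cases hb : c = "Background"
  · subst hb; decide
  · have hb' : (c == "Background") = false := by simpa using hb
    by_cases h2 : PySem.Str.endswith c "_bg_subtracted"
    · have h0 := pvExcl c "_bg_subtracted" "_raw" (by decide) (by decide) h2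
      simp at h0 h2
      simp [pvRank, hb', h0, h2]
    · simp only [Bool.not_eq_true] at h2
      simp only [pvRank, hb', Bool.false_eq_true, if_false, h2]
      split_ifs <;> decide

theorem pvM3 : (fun c => PySem.Str.endswith c "_smoothed") = (fun c => pvRank c == some 3) := by
  funext c
  by_cases hb : c = "Background"
  · subst hb; decide
  · have hb' : (c == "Background") = false := by simpa using hb
    by_cases h3 : PySem.Str.endswith c "_smoothed"
    · have h0 := pvExcl c "_smoothed" "_raw" (by decide) (by decide) h3
      have h2 := pvExcl c "_smoothed" "_bg_subtracted" (by decide) (by decide) h3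
      simp at h0 h2 h3
      simp [pvRank, hb', h0, h2, h3]
    · simp only [Bool.not_eq_true] at h3
      simp only [pvRank, hb', Bool.false_eq_true, if_false, h3]
      split_ifs <;> decide

theorem pvM4 : (fun c => PySem.Str.endswith c "_normalized") = (fun c => pvRank c == some 4) := by
  funext c
  by_cases hb : c = "Background"
  · subst hb; decide
  · have hb' : (c == "Background") = false := by simpa using hb
    by_cases h4 : PySem.Str.endswith c "_normalized"
    · have h0 := pvExcl c "_normalized" "_raw" (by decide) (by decide) h4
      have h2 := pvExcl c "_normalized" "_bg_subtracted" (by decide) (by decide) h4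
      have h3 := pvExcl c "_normalized" "_smoothed" (by decide) (by decide) h4
      simp at h0 h2 h3 h4
      simp [pvRank, hb', h0, h2, h3, h4]
    · simp only [Bool.not_eq_true] at h4
      simp only [pvRank, hb', Bool.false_eq_true, if_false, h4]
      split_ifs <;> decide

theorem pvM5 : (fun c => PySem.Str.endswith c "_despiked") = (fun c => pvRank c == some 5) := by
  funext c
  by_cases hb : c = "Background"
  · subst hb; decide
  · have hb' : (c == "Background") = false := by simpa using hb
    by_cases h5 : PySem.Str.endswith c "_despiked"
    · have h0 := pvExcl c "_despiked" "_raw" (by decide) (by decide) h5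
      have h2 := pvExcl c "_despiked" "_bg_subtracted" (by decide) (by decide) h5
      have h3 := pvExcl c "_despiked" "_smoothed" (by decide) (by decide) h5
      have h4 := pvExcl c "_despiked" "_normalized" (by decide) (by decide) h5
      simp at h0 h2 h3 h4 h5
      simp [pvRank, hb', h0, h2, h3, h4, h5]
    · simp only [Bool.not_eq_true] at h5
      simp only [pvRank, hb', Bool.false_eq_true, if_false, h5]
      split_ifs <;> decide

-- a found column has that rank
theorem pvFind_some (columns : List String) (r : Int) (x : String)
    (h : pvFind columns r = some x) : pvRank x = some r := by
  have := List.find?_some h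
  simpa [beq_iff_eq] using this

theorem pvRank_cases (c : String) (r : Int) (h : pvRank c = some r) :
    r = 0 ∨ r = 1 ∨ r = 2 ∨ r = 3 ∨ r = 4 ∨ r = 5 := by
  unfold pvRank at h
  split_ifs at h <;> simp_all

theorem pvFind_ne_empty (columns : List String) (r : Int) (x : String)
    (h : pvFind columns r = some x) : x ≠ "" := by
  intro hx
  subst hx
  have h1 := pvFind_some columns r "" h
  rw [(by decide : pvRank "" = (none : Option Int))] at h1
  exact absurd h1 (by simp)

theorem pvFindNe (columns : List String) (r s : Int) (hne : r ≠ s) (x : String)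
    (hr : pvFind columns r = some x) : pvFind columns s ≠ some x := by
  intro hs
  have h1 := pvFind_some columns r x hr
  have h2 := pvFind_some columns s x hs
  rw [h1] at h2
  exact hne (Option.some.injEq .. ▸ h2 ▸ rfl)

-- A's append loop over the six find? results is filterMap id
theorem pvFoldA (os : List (Option String)) (acc : List String)
    (hnil : ∀ x : String, some x ∈ os → x ≠ "")
    (hacc : ∀ x : String, some x ∈ os → x ∉ acc)
    (hpw : os.Pairwise (fun a b => ∀ x : String, a = some x → b ≠ some x)) :
    os.foldl pvStepA acc = acc ++ os.filterMap id := by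
  induction os generalizing acc with
  | nil => simp
  | cons o t ih =>
      cases o with
      | none =>
          simp only [List.foldl_cons, List.filterMap_cons]
          exact ih acc (fun x hx => hnil x (by simp [hx])) (fun x hx => hacc x (by simp [hx]))
            (List.Pairwise.sublist (List.sublist_cons_self _ _) hpw)
      | some m =>
          have hm : m ≠ "" := hnil m (by simp)
          have hma : m ∉ acc := hacc m (by simp)
          have hstep : pvStepA acc (some m) = acc ++ [m] := by
            simp [pvStepA, hm, hma]
          rw [List.pairwise_cons] at hpw
          simp only [List.foldl_cons, hstep, List.filterMap_cons, id]
          rw [ih (acc ++ [m]) (fun x hx => hnil x (by simp [hx]))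
            (by
              intro x hx
              simp only [List.mem_append, List.mem_singleton, not_or]
              refine ⟨hacc x (by simp [hx]), ?_⟩
              intro he
              subst he
              exact hpw.1 _ hx x rfl rfl)
            hpw.2]
          simp

-- B's dict loop: lookup after the fold is A's find?
theorem pvFoldB_get? (columns : List String) (d : PySem.Dict Int String) (r : Int) :
    (columns.foldl pvStepB d).get? r = (d.get? r).or (pvFind columns r) := by
  induction columns generalizing d with
  | nil => simp [pvFind]
  | cons c t ih =>
      simp only [List.foldl_cons]
      rw [ih]
      cases hc : pvRank c with
      | none =>
          have hpred : (pvRank c == some r) = false := by simp [hc]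
          simp [pvStepB, hc, pvFind]
      | some r0 =>
          by_cases hr : r = r0
          · subst hr
            have hpred : (pvRank c == some r) = true := by simp [hc]
            simp only [pvStepB, hc]
            rw [PySem.Dict.get?_setdefault_self]
            have : pvFind (c :: t) r = some c := by
              simp [pvFind, hpred]
            rw [this]
            cases hd : d.get? r <;> simp
          · have hpred : (pvRank c == some r) = false := by simp [hc, Ne.symm hr]
            simp only [pvStepB, hc]
            rw [PySem.Dict.get?_setdefault_of_ne _ _ hr]
            simp [pvFind, hpred]

theorem pvFoldB_nodup (columns : List String) (d : PySem.Dict Int String)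
    (h : d.keys.Nodup) : (columns.foldl pvStepB d).keys.Nodup := by
  induction columns generalizing d with
  | nil => exact h
  | cons c t ih =>
      simp only [List.foldl_cons]
      apply ih
      cases hc : pvRank c with
      | none => simpa [pvStepB, hc] using h
      | some r0 =>
          simp only [pvStepB, hc]
          by_cases hco : d.contains r0
          · rw [PySem.Dict.setdefault_of_contains _ _ hco]; exact h
          · rw [PySem.Dict.setdefault_of_not_contains _ _ (by simpa using hco)]
            exact PySem.Dict.nodup_keys_insert _ _ _ h

-- the target ordered pair list, in rank order
def pvYs (columns : List String) : List (Int × String) :=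
  pvRanks.filterMap (fun r => (pvFind columns r).map (fun c => (r, c)))

theorem pvYs_mem (columns : List String) (p : Int × String) :
    p ∈ pvYs columns ↔ pvFind columns p.1 = some p.2 := by
  constructor
  · intro hp
    rcases List.mem_filterMap.mp hp with ⟨r, _, hmap⟩
    cases hf : pvFind columns r with
    | none => rw [hf] at hmap; simp at hmap
    | some c =>
        rw [hf] at hmap
        simp only [Option.map_some, Option.some.injEq] at hmap
        subst hmap
        exact hf
  · intro hp
    apply List.mem_filterMap.mpr
    refine ⟨p.1, ?_, by simp [hp]⟩
    have := pvRank_cases p.2 p.1 (pvFind_some columns p.1 p.2 hp)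
    simp only [pvRanks, List.mem_cons, List.not_mem_nil, or_false]
    omega

theorem pvFM_pairwise (g : Int → Option String) (rs : List Int) (h : rs.Pairwise (· < ·)) :
    (rs.filterMap (fun r => (g r).map (fun c => (r, c)))).Pairwise (fun a b => a.1 < b.1) := by
  induction rs with
  | nil => simp
  | cons r t ih =>
      rw [List.pairwise_cons] at h
      cases hf : g r with
      | none => simpa [hf] using ih h.2
      | some c =>
          simp only [List.filterMap_cons, hf, Option.map_some]
          rw [List.pairwise_cons]
          refine ⟨?_, ih h.2⟩
          intro p hp
          rcases List.mem_filterMap.mp hp with ⟨r', hr', hmap⟩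
          cases hf' : g r' with
          | none => rw [hf'] at hmap; simp at hmap
          | some c' =>
              rw [hf'] at hmap
              simp only [Option.map_some, Option.some.injEq] at hmap
              subst hmap
              exact h.1 r' hr'

theorem pvYs_pairwise (columns : List String) :
    (pvYs columns).Pairwise (fun a b => a.1 < b.1) :=
  pvFM_pairwise (pvFind columns) pvRanks (by decide)

theorem pvFM_map_snd (g : Int → Option String) (rs : List Int) :
    (rs.filterMap (fun r => (g r).map (fun c => (r, c)))).map (fun p => p.2)
      = (rs.map g).filterMap id := by
  induction rs with
  | nil => rfl
  | cons r t ih =>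
      cases hf : g r <;>
        simp [hf, ih]

theorem pvYs_map_snd (columns : List String) :
    (pvYs columns).map (fun p => p.2) = (pvRanks.map (pvFind columns)).filterMap id :=
  pvFM_map_snd (pvFind columns) pvRanks

theorem pvTake_min {α : Type} (xs : List α) (n : Nat) :
    xs.take (min n xs.length) = xs.take n := by
  rw [← List.take_take, List.take_length]

theorem pvSorted_items (columns : List String) :
    PySem.List.sorted (columns.foldl pvStepB (PySem.Dict.empty : PySem.Dict Int String)).items
      (fun item => item.1) = pvYs columns := by
  set d := columns.foldl pvStepB (PySem.Dict.empty : PySem.Dict Int String) with hd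
  have hnodupk : d.keys.Nodup := pvFoldB_nodup columns _ PySem.Dict.nodup_keys_empty
  have hget : ∀ r, d.get? r = pvFind columns r := by
    intro r
    rw [hd, pvFoldB_get? columns _ r]
    simp
  have hitems : d.items.Nodup := by
    have : d.keys = d.items.map (fun p => p.1) := rfl
    rw [this] at hnodupk
    exact hnodupk.of_map
  have hys_nodup : (pvYs columns).Nodup := by
    have := pvYs_pairwise columns
    exact List.Pairwise.imp (fun h => by
      intro he; subst he; exact lt_irrefl _ h) this
  apply PySem.List.sorted_eq_of_perm_of_pairwise_lt
  · apply (List.perm_ext_iff_of_nodup hys_nodup hitems).mpr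
    intro p
    rw [pvYs_mem]
    cases p with
    | mk r c =>
        rw [← hget r]
        exact (PySem.Dict.get?_eq_some_iff_mem_items d r c hnodupk)
  · exact pvYs_pairwise columns

-- ===== VERDICT (by name: the statement is the Claim_ definition above) =====
theorem default_compare_columns_py_spec : Claim_equal_default_compare_columns_py := by
  intro columns _
  show default_compare_columns_py columns = default_compare_columns_py_alt columns
  unfold default_compare_columns_py default_compare_columns_py_alt
  have hmaps : pvMatchersA.map (fun m => columns.find? m) = pvRanks.map (pvFind columns) := by
    simp only [pvMatchersA, List.map]
    rw [pvM0, pvM1, pvM2, pvM3, pvM4, pvM5]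
    rfl
  have hA : pvMatchersA.foldl (fun ordered matcher => pvStepA ordered (columns.find? matcher)) []
      = (pvRanks.map (pvFind columns)).filterMap id := by
    rw [← List.foldl_map (f := fun m => columns.find? m) (g := pvStepA), hmaps]
    rw [pvFoldA _ []
      (by
        intro x hx
        rcases List.mem_map.mp hx with ⟨r, _, hr⟩
        exact pvFind_ne_empty columns r x hr)
      (by intro x _; simp)
      (by
        rw [List.pairwise_map]
        have hne : pvRanks.Pairwise (· ≠ ·) := by decide
        refine List.Pairwise.imp ?_ hne
        intro r s hrs x hr
        exact pvFindNe columns r s hrs x hr)]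
    simp
  simp only [hA, pvSorted_items columns, pvYs_map_snd, pvTake_min]
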